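-- pv_equiv track=rewrite | github.com/Usman-Ali-cpu/BattleShip-Game-Cpp | Usama CH/C++/mmmm.py | foo
-- ===== SOURCE A (Python) =====
-- def foo(s, t):
--     i = 0
--     while i < len(t):
--         j = 0
--         while j < len(s) and s[j] == t[(j+i) % len(t)-1]:
--             j += 1
--         if(j == len(s)):
--             return i
--         i += 1
--     return -1
-- ===== SOURCE B (Python) =====
-- def foo(s, t):
--     n = len(t)
--     if n == 0:
--         return -1
--     T = t * (len(s) // n + 2)
--     if T.startswith(s, n - 1):
--         return 0
--     p = T.find(s)
--     if p != -1 and p <= n - 2: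
--         return p + 1
--     return -1
-- ===== Notes on version B (the rewrite author's own statement) =====
-- stated objective: faster
-- what changed: Replace the quadratic offset-by-offset scan with a single substring search of s in t repeated enough times (C-level str.find / startswith), mapping the found position back to A's offset (A's offset i reads t starting at index i-1, so position n-1 maps to offset 0 and position p<=n-2 to p+1).
import Mathlib
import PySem

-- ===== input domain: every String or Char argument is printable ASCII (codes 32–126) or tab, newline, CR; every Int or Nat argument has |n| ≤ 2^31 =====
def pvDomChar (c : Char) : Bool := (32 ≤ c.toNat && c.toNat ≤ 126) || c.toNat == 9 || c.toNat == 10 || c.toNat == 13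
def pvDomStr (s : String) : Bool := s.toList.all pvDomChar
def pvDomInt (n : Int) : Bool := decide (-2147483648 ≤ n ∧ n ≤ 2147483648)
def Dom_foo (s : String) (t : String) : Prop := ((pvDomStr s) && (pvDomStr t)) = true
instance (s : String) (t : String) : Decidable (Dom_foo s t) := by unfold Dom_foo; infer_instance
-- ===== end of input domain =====

-- B replaces A's offset-by-offset quadratic scan with a single substring search of s
-- inside t repeated enough times, shifting the found position back to A's offset.

-- ===== PORT A =====
-- inner 'while j < len(s) and s[j] == t[(j+i) % len(t) - 1]: j += 1'
-- (Option equality is exact here: s[j] is in range under the guard j < len(s), and the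
--  t-index (j+i) % len(t) - 1 lies in [-1, len(t)-2], in range whenever t ≠ '' — which
--  the outer loop guard i < len(t) guarantees)
def fooInner (sl tl : List Char) (i : Nat) (j : Nat) : Nat :=
  if j < sl.length ∧ sl[j]? = PySem.List.pyGet? tl (PySem.Int.mod ((j : Int) + (i : Int)) (PySem.List.len tl) - 1) then
    fooInner sl tl i (j + 1)
  else j
termination_by sl.length - j
decreasing_by omega

-- outer 'while i < len(t)', with the early 'return i' when j == len(s)
def fooOuter (sl tl : List Char) (i : Nat) : Int :=
  if i < tl.length then
    if fooInner sl tl i 0 = sl.length then (i : Int)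
    else fooOuter sl tl (i + 1)
  else -1
termination_by tl.length - i
decreasing_by omega

def foo (s : String) (t : String) : Int := fooOuter s.toList t.toList 0

-- ===== PORT B =====
-- t * k  (Python string repetition)
def repChars (tl : List Char) : Nat → List Char
  | 0 => []
  | k + 1 => tl ++ repChars tl k

def foo_alt (s : String) (t : String) : Int :=
  let sl := s.toList
  let tl := t.toList
  let n := tl.length
  if n = 0 then -1
  else
    -- len(s) // n on nonnegative operands is exactly Nat division
    let T := repChars tl (sl.length / n + 2)
    -- T.startswith(s, n-1) with 0 ≤ n-1 ≤ len(T) is exactly: s is a prefix of T[n-1:]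
    if PySem.Chars.startswith (T.drop (n - 1)) sl then 0
    else
      let p := PySem.Chars.find T sl
      if p ≠ -1 ∧ p ≤ (n : Int) - 2 then p + 1 else -1

-- ===== PRECONDITION & SPEC =====
def Spec_foo (s : String) (t : String) (out : Int) : Prop := out = foo_alt s t
instance (s : String) (t : String) (out : Int) : Decidable (Spec_foo s t out) := by unfold Spec_foo; infer_instance

-- ===== CLAIM (what is proved, stated in full; the proofs are below) =====
def Claim_equal_foo : Prop := ∀ (s : String) (t : String), Dom_foo s t → Spec_foo s t (foo s t)

-- ===== LEMMAS AND PROOFS =====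

-- s matches the cyclic read of t starting at position p (indices taken mod |t|)
def MatchAt (sl tl : List Char) (p : Nat) : Prop :=
  ∀ j < sl.length, sl[j]? = tl[(p + j) % tl.length]?

lemma matchAt_mod (sl tl : List Char) (p : Nat) :
    MatchAt sl tl (p % tl.length) ↔ MatchAt sl tl p := by
  unfold MatchAt
  constructor <;> intro h j hj <;> rw [h j hj] <;> rw [Nat.mod_add_mod]

-- the t-index A computes, normalised: t[(j+i) % n - 1] = t[(i + j + (n-1)) % n]
lemma index_norm (tl : List Char) (i j : Nat) (hn : 0 < tl.length) :
    PySem.List.pyGet? tl (PySem.Int.mod ((j : Int) + (i : Int)) (PySem.List.len tl) - 1)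
      = tl[(i + j + (tl.length - 1)) % tl.length]? := by
  set n := tl.length with hn'
  have hmod : PySem.Int.mod ((j : Int) + (i : Int)) (PySem.List.len tl)
      = (((j + i) % n : Nat) : Int) := by
    rw [PySem.List.len_eq, PySem.Int.mod_eq_emod_of_pos (by exact_mod_cast hn : (0:Int) < (n:Int))]
    push_cast
    rfl
  rw [hmod]
  have key : (i + j + (n - 1)) % n = ((j + i) % n + (n - 1)) % n := by
    rw [Nat.add_mod, Nat.mod_eq_of_lt (show n - 1 < n by omega), Nat.add_comm i j]
  rcases Nat.eq_zero_or_pos ((j + i) % n) with h0 | hpos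
  · rw [h0]
    norm_num
    rw [PySem.List.pyGet?_neg_one, List.getLast?_eq_getElem?]
    congr 1
    rw [key, h0, Nat.zero_add, Nat.mod_eq_of_lt (by omega)]
  · have hlt : (j + i) % n < n := Nat.mod_lt _ hn
    have hc : (((j + i) % n : Nat) : Int) - 1 = (((j + i) % n - 1 : Nat) : Int) := by omega
    rw [hc, PySem.List.pyGet?_natCast]
    congr 1
    rw [key]
    have h4 : (j + i) % n + (n - 1) = n + ((j + i) % n - 1) := by omega
    rw [h4, Nat.add_mod_left]
    exact (Nat.mod_eq_of_lt (by omega)).symm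

lemma fooInner_eq (sl tl : List Char) (i : Nat) (hn : 0 < tl.length) :
    ∀ j, j ≤ sl.length →
      (fooInner sl tl i j = sl.length ↔
        ∀ j', j ≤ j' → j' < sl.length → sl[j']? = tl[(i + j' + (tl.length - 1)) % tl.length]?) := by
  have main : ∀ d j, j ≤ sl.length → sl.length - j = d →
      (fooInner sl tl i j = sl.length ↔
        ∀ j', j ≤ j' → j' < sl.length → sl[j']? = tl[(i + j' + (tl.length - 1)) % tl.length]?) := by
    intro d
    induction d with
    | zero =>
      intro j hj hd
      have hje : j = sl.length := by omega
      rw [fooInner]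
      rw [if_neg (by omega)]
      constructor
      · intro _ j' hj' hj'' ; omega
      · intro _ ; exact hje
    | succ d ih =>
      intro j hj hd
      have hjlt : j < sl.length := by omega
      rw [fooInner, index_norm tl i j hn]
      by_cases hc : sl[j]? = tl[(i + j + (tl.length - 1)) % tl.length]?
      · rw [if_pos ⟨hjlt, hc⟩]
        rw [ih (j + 1) (by omega) (by omega)]
        constructor
        · intro h j' hj' hj''
          rcases Nat.eq_or_lt_of_le hj' with rfl | hlt
          · exact hc
          · exact h j' hlt hj''
        · intro h j' hj' hj''
          exact h j' (by omega) hj''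
      · rw [if_neg (by tauto)]
        constructor
        · intro h ; omega
        · intro h ; exact absurd (h j le_rfl hjlt) hc
  intro j hj
  exact main (sl.length - j) j hj rfl

lemma fooInner_matchAt (sl tl : List Char) (i : Nat) (hn : 0 < tl.length) :
    fooInner sl tl i 0 = sl.length ↔ MatchAt sl tl (i + (tl.length - 1)) := by
  rw [fooInner_eq sl tl i hn 0 (Nat.zero_le _)]
  unfold MatchAt
  constructor
  · intro h j hj
    rw [show i + (tl.length - 1) + j = i + j + (tl.length - 1) by omega]
    exact h j (Nat.zero_le _) hj
  · intro h j' _ hj'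
    rw [show i + j' + (tl.length - 1) = i + (tl.length - 1) + j' by omega]
    exact h j' hj'

lemma fooOuter_none (sl tl : List Char) (hn : 0 < tl.length) :
    ∀ i, (∀ k, i ≤ k → k < tl.length → ¬ MatchAt sl tl (k + (tl.length - 1))) →
      fooOuter sl tl i = -1 := by
  have main : ∀ d i, tl.length - i = d →
      (∀ k, i ≤ k → k < tl.length → ¬ MatchAt sl tl (k + (tl.length - 1))) →
      fooOuter sl tl i = -1 := by
    intro d
    induction d with
    | zero =>
      intro i hd _
      rw [fooOuter, if_neg (by omega)]
    | succ d ih =>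
      intro i hd h
      rw [fooOuter, if_pos (by omega),
        if_neg (by rw [fooInner_matchAt sl tl i hn]; exact h i le_rfl (by omega))]
      exact ih (i + 1) (by omega) (fun k hk hk' => h k (by omega) hk')
  intro i
  exact main (tl.length - i) i rfl

lemma fooOuter_some (sl tl : List Char) (hn : 0 < tl.length) :
    ∀ i k, i ≤ k → k < tl.length → MatchAt sl tl (k + (tl.length - 1)) →
      (∀ k', i ≤ k' → k' < k → ¬ MatchAt sl tl (k' + (tl.length - 1))) →
      fooOuter sl tl i = (k : Int) := by
  have main : ∀ d i k, k - i = d → i ≤ k → k < tl.length → MatchAt sl tl (k + (tl.length - 1)) →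
      (∀ k', i ≤ k' → k' < k → ¬ MatchAt sl tl (k' + (tl.length - 1))) →
      fooOuter sl tl i = (k : Int) := by
    intro d
    induction d with
    | zero =>
      intro i k hd hik hk hm _
      have : i = k := by omega
      subst this
      rw [fooOuter, if_pos (by omega), if_pos ((fooInner_matchAt sl tl i hn).2 hm)]
    | succ d ih =>
      intro i k hd hik hk hm hmin
      have hilt : i < k := by omega
      rw [fooOuter, if_pos (by omega),
        if_neg (by rw [fooInner_matchAt sl tl i hn]; exact hmin i le_rfl hilt)]
      exact ih (i + 1) k (by omega) (by omega) hk hm (fun k' hk' hk'' => hmin k' (by omega) hk'')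
  intro i k hik
  exact main (k - i) i k rfl hik

lemma length_repChars (tl : List Char) (k : Nat) : (repChars tl k).length = k * tl.length := by
  induction k with
  | zero => simp [repChars]
  | succ k ih => simp [repChars, ih]; ring

lemma getElem?_repChars (tl : List Char) (k x : Nat) (hx : x < k * tl.length) :
    (repChars tl k)[x]? = tl[x % tl.length]? := by
  induction k generalizing x with
  | zero => omega
  | succ k ih =>
    have hexp : (k + 1) * tl.length = tl.length + k * tl.length := by ring
    by_cases h : x < tl.length
    · rw [repChars, List.getElem?_append_left h, Nat.mod_eq_of_lt h]
    · have hle : tl.length ≤ x := by omega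
      rw [repChars, List.getElem?_append_right hle, ih (x - tl.length) (by omega),
        Nat.mod_eq_sub_mod hle]

lemma len_T_big (m n : Nat) (hn : 0 < n) : m + n - 1 < (m / n + 2) * n := by
  have h1 : m / n * n + m % n = m := by rw [Nat.mul_comm]; exact Nat.div_add_mod m n
  have h2 : m % n < n := Nat.mod_lt m hn
  have h3 : (m / n + 2) * n = m / n * n + 2 * n := by ring
  rw [h3]
  generalize hq : m / n * n = q at h1 ⊢
  generalize hr : m % n = r at h1 h2
  omega

lemma occ_iff_matchAt (sl tl : List Char) (hn : 0 < tl.length) (p : Nat) (hp : p < tl.length) :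
    sl <+: (repChars tl (sl.length / tl.length + 2)).drop p ↔ MatchAt sl tl p := by
  have hbig := len_T_big sl.length tl.length hn
  rw [List.prefix_iff_getElem?]
  unfold MatchAt
  constructor
  · intro h j hj
    have := h j hj
    rw [List.getElem?_drop, getElem?_repChars tl _ (p + j) (by omega)] at this
    rw [List.getElem?_eq_getElem hj, this]
  · intro h j hj
    have := h j hj
    rw [List.getElem?_eq_getElem hj] at this
    rw [List.getElem?_drop, getElem?_repChars tl _ (p + j) (by omega), ← this]

lemma occ_matchAt_mod (sl tl : List Char) (_hn : 0 < tl.length) (p : Nat)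
    (h : sl <+: (repChars tl (sl.length / tl.length + 2)).drop p) :
    MatchAt sl tl (p % tl.length) := by
  have hlen := length_repChars tl (sl.length / tl.length + 2)
  have h2 := h.length_le
  rw [List.length_drop, hlen] at h2
  rw [List.prefix_iff_getElem?] at h
  intro j hj
  have := h j hj
  rw [List.getElem?_drop, getElem?_repChars tl _ (p + j) (by omega)] at this
  rw [List.getElem?_eq_getElem hj, Nat.mod_add_mod]
  exact this.symm

lemma main_eq (s t : String) : foo s t = foo_alt s t := by
  have hfoo : foo s t = fooOuter s.toList t.toList 0 := rfl
  rcases Nat.eq_zero_or_pos t.toList.length with hn0 | hn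
  · simp only [foo_alt]
    rw [if_pos hn0, hfoo, fooOuter, if_neg (by omega)]
  · simp only [foo_alt]
    set sl := s.toList with hsl
    set tl := t.toList with htl
    rw [if_neg (by omega)]
    by_cases hm : MatchAt sl tl (tl.length - 1)
    · rw [if_pos (by
        rw [PySem.Chars.startswith_iff]
        exact (occ_iff_matchAt sl tl hn _ (by omega)).2 hm)]
      rw [hfoo]
      exact fooOuter_some sl tl hn 0 0 le_rfl hn (by simpa using hm) (by omega)
    · rw [if_neg (by
        rw [PySem.Chars.startswith_iff]
        intro h
        exact hm ((occ_iff_matchAt sl tl hn _ (by omega)).1 h))]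
      haveI : DecidablePred (fun p => p < tl.length - 1 ∧ MatchAt sl tl p) :=
        fun _ => Classical.dec _
      by_cases hex : ∃ p, p < tl.length - 1 ∧ MatchAt sl tl p
      · obtain ⟨hp1, hp2⟩ := Nat.find_spec hex
        set p := Nat.find hex with hpdef
        -- the first occurrence found by find is exactly p
        have hoccp : sl <+: (repChars tl (sl.length / tl.length + 2)).drop p :=
          (occ_iff_matchAt sl tl hn p (by omega)).2 hp2
        have hisin : PySem.Chars.isIn sl (repChars tl (sl.length / tl.length + 2)) = true :=
          (PySem.Chars.exists_prefix_drop_iff_isIn _ _).1 ⟨p, hoccp⟩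
        have hnonneg : 0 ≤ PySem.Chars.find (repChars tl (sl.length / tl.length + 2)) sl :=
          (PySem.Chars.find_nonneg_iff _ _).2 ((PySem.Chars.isIn_iff_infix _ _).1 hisin)
        obtain ⟨hq1, hq2⟩ := PySem.Chars.find_spec hnonneg
        set q := (PySem.Chars.find (repChars tl (sl.length / tl.length + 2)) sl).toNat with hqdef
        have hqle : q ≤ p := by
          by_contra hqp
          exact hq2 p (by omega) hoccp
        have hmq : MatchAt sl tl q := by
          have := occ_matchAt_mod sl tl hn q hq1
          rwa [Nat.mod_eq_of_lt (by omega)] at this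
        have hpq : p ≤ q := Nat.find_min' hex ⟨by omega, hmq⟩
        have hfind : PySem.Chars.find (repChars tl (sl.length / tl.length + 2)) sl = (p : Int) := by
          rw [← Int.toNat_of_nonneg hnonneg, ← hqdef]
          congr 1
          omega
        rw [hfind, if_pos ⟨by omega, by omega⟩, hfoo]
        have hA : fooOuter sl tl 0 = ((p + 1 : Nat) : Int) := by
          apply fooOuter_some sl tl hn 0 (p + 1) (by omega) (by omega)
          · rw [show p + 1 + (tl.length - 1) = tl.length + p by omega, ← matchAt_mod,
              Nat.add_mod_left, Nat.mod_eq_of_lt (by omega)]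
            exact hp2
          · intro k' _ hk'
            rcases Nat.eq_zero_or_pos k' with rfl | hk0
            · simpa using hm
            · rw [show k' + (tl.length - 1) = tl.length + (k' - 1) by omega, ← matchAt_mod,
                Nat.add_mod_left, Nat.mod_eq_of_lt (by omega)]
              exact fun hMk => Nat.find_min hex (show k' - 1 < p by omega) ⟨by omega, hMk⟩
        rw [hA]
        push_cast
        ring
      · have hnomatch : ∀ q, q < tl.length → ¬ MatchAt sl tl q := by
          intro q hq hMq
          rcases Nat.lt_or_ge q (tl.length - 1) with h | h
          · exact hex ⟨q, h, hMq⟩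
          · have : q = tl.length - 1 := by omega
            exact hm (this ▸ hMq)
        have hfind : PySem.Chars.find (repChars tl (sl.length / tl.length + 2)) sl = -1 := by
          rw [PySem.Chars.find_eq_neg_one_iff]
          intro hinf
          obtain ⟨j, hj⟩ := (PySem.Chars.exists_prefix_drop_iff_isIn _ _).2
            ((PySem.Chars.isIn_iff_infix _ _).2 hinf)
          exact hnomatch (j % tl.length) (Nat.mod_lt _ hn) (occ_matchAt_mod sl tl hn j hj)
        rw [hfind, if_neg (by simp), hfoo]
        apply fooOuter_none sl tl hn 0
        intro k _ hk hMk
        exact hnomatch ((k + (tl.length - 1)) % tl.length) (Nat.mod_lt _ hn)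
          ((matchAt_mod sl tl _).2 hMk)

-- ===== VERDICT (by name: the statement is the Claim_ definition above) =====
theorem foo_spec : Claim_equal_foo := by
  intro s t _
  unfold Spec_foo
  exact main_eq s t
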